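-- pv_equiv track=rewrite | github.com/tpgiv1995/census-api | app.py | pick_election_column
-- ===== SOURCE A (Python) =====
-- from typing import List, Dict, Any, Optional, Tuple
--
-- def pick_election_column(cols:List[str])->Optional[str]:
--     # prefer explicit 'election', then 'coverage', then 'tier'
--     order = ["election", "coverage", "tier"]
--     lowered = [c.lower() for c in cols]
--     for key in order:
--         matches = [c for c in cols if key in c.lower()]
--         if matches:
--             # Prefer shortest, simplest label (often the intended signal)
--             return sorted(matches, key=lambda x: (len(x), x.lower())).pop(0)
--     return None
-- ===== SOURCE B (Python) =====
-- def _priority(cl):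
--     if "election" in cl:
--         return 0
--     if "coverage" in cl:
--         return 1
--     if "tier" in cl:
--         return 2
--     return None
--
-- def pick_election_column(cols):
--     # single pass: global min by composite key (priority, len, lowercase); no sort
--     best = None  # (key, column)
--     for c in cols:
--         cl = c.lower()
--         p = _priority(cl)
--         if p is None:
--             continue
--         k = (p, len(c), cl)
--         if best is None or k < best[0]:
--             best = (k, c)
--     return best[1] if best is not None else None
-- ===== Notes on version B (the rewrite author's own statement) =====
-- stated objective: faster
-- what changed: Replaces the per-keyword collect-filter-then-full-sort passes with one single pass over the columns that keeps a running minimum under the composite key (keyword priority, length, lowercase), removing the sort entirely.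
import Mathlib
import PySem

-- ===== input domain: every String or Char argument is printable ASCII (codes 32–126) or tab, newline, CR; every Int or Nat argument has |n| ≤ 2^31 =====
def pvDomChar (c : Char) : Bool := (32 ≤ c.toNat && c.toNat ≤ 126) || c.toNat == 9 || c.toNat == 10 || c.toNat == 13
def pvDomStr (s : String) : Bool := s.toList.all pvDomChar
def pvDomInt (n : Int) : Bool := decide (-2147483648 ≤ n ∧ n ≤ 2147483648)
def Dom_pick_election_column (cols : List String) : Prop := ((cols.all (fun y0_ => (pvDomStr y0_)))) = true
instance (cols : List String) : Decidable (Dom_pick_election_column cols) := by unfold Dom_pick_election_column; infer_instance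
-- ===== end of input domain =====

-- B replaces A's per-keyword collect-then-sort passes by one single pass keeping a running
-- minimum under the composite key (keyword priority, length, lowercase), removing the sort (objective: faster, measured).

-- ===== PORT A =====
-- the 'for key in order' loop with its early return
def pickLoopA (cols : List String) : List String → Option String
  | [] => none
  | key :: rest =>
    let ms := cols.filter (fun c => PySem.Str.isIn key (PySem.Str.lower c))
    if ms.isEmpty then
      pickLoopA cols rest
    else
      match PySem.List.pop? (PySem.List.sorted2 ms
              (fun x => PySem.Str.len x) (fun x => PySem.Str.lower x) false) 0 with
      | some (v, _) => some v
      | none => none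

def pick_election_column (cols : List String) : Option String :=
  let _lowered := cols.map (fun c => PySem.Str.lower c)   -- A computes 'lowered' but never uses it
  pickLoopA cols ["election", "coverage", "tier"]

-- ===== PORT B =====
-- helper _priority of Source B
def pvPriority? (cl : String) : Option Int :=
  if PySem.Str.isIn "election" cl then some 0
  else if PySem.Str.isIn "coverage" cl then some 1
  else if PySem.Str.isIn "tier" cl then some 2
  else none

-- Python's lexicographic '<' on the 3-tuple (int, int, str)
def pvKeyLt (k1 k2 : Int × Int × String) : Bool :=
  decide (k1.1 < k2.1) ||
    (k1.1 == k2.1 && (decide (k1.2.1 < k2.2.1) ||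
      (k1.2.1 == k2.2.1 && decide (k1.2.2 < k2.2.2))))

def pick_election_column_alt (cols : List String) : Option String :=
  let best := cols.foldl (fun best c =>
    let cl := PySem.Str.lower c
    match pvPriority? cl with
    | none => best
    | some p =>
      let k : Int × Int × String := (p, PySem.Str.len c, cl)
      match best with
      | none => some (k, c)
      | some b => if pvKeyLt k b.1 then some (k, c) else some b) none
  match best with
  | none => none
  | some b => some b.2

-- ===== PRECONDITION & SPEC =====
def Spec_pick_election_column (cols : List String) (out : Option String) : Prop := out = pick_election_column_alt cols
instance (cols : List String) (out : Option String) : Decidable (Spec_pick_election_column cols out) := by unfold Spec_pick_election_column; infer_instance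

-- ===== CLAIM (what is proved, stated in full; the proofs are below) =====
def Claim_equal_pick_election_column : Prop := ∀ (cols : List String), Dom_pick_election_column cols → Spec_pick_election_column cols (pick_election_column cols)

-- ===== LEMMAS AND PROOFS =====

-- the 'before' comparison sorted2 uses with keys (len, lower)
def ltLenLower (a b : String) : Bool :=
  decide (PySem.Str.len a < PySem.Str.len b) ||
    (!decide (PySem.Str.len b < PySem.Str.len a) && decide (PySem.Str.lower a < PySem.Str.lower b))

def stepBy {α : Type} (before : α → α → Bool) (h : Option α) (x : α) : Option α :=
  match h with
  | none => some x
  | some m => if before x m then some x else some m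

def stepOpt : Option String → String → Option String := stepBy ltLenLower

-- running first-minimum over the f-matching columns
def bucket (f : String → Bool) (cols : List String) : Option String :=
  cols.foldl (fun h c => if f c then stepOpt h c else h) none

def fe (c : String) : Bool := PySem.Str.isIn "election" (PySem.Str.lower c)
def fc (c : String) : Bool := PySem.Str.isIn "coverage" (PySem.Str.lower c)
def ft (c : String) : Bool := PySem.Str.isIn "tier" (PySem.Str.lower c)
def g1 (c : String) : Bool := !fe c && fc c
def g2 (c : String) : Bool := !fe c && !fc c && ft c

def bkey (p : Int) (m : String) : Int × Int × String := (p, PySem.Str.len m, PySem.Str.lower m)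

def mergeB (s0 s1 s2 : Option String) : Option ((Int × Int × String) × String) :=
  match s0 with
  | some m => some (bkey 0 m, m)
  | none =>
    match s1 with
    | some m => some (bkey 1 m, m)
    | none =>
      match s2 with
      | some m => some (bkey 2 m, m)
      | none => none

def Bstep (best : Option ((Int × Int × String) × String)) (c : String) :
    Option ((Int × Int × String) × String) :=
  let cl := PySem.Str.lower c
  match pvPriority? cl with
  | none => best
  | some p =>
    let k : Int × Int × String := (p, PySem.Str.len c, cl)
    match best with
    | none => some (k, c)
    | some b => if pvKeyLt k b.1 then some (k, c) else some b

theorem head?_foldl_insertBy {α : Type} (before : α → α → Bool) (xs : List α) :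
    ∀ acc : List α,
      (List.foldl (fun a x => PySem.List.insertBy before x a) acc xs).head? =
      List.foldl (stepBy before) acc.head? xs := by
  induction xs with
  | nil => intro acc; rfl
  | cons x t ih =>
    intro acc
    have hstep : (PySem.List.insertBy before x acc).head? =
        stepBy before acc.head? x := by
      cases acc with
      | nil => rfl
      | cons y ys =>
        simp only [PySem.List.insertBy, stepBy]
        split_ifs <;> simp_all
    simp only [List.foldl_cons, ih, hstep]

theorem head?_sorted2 (ms : List String) :
    (PySem.List.sorted2 ms (fun x => PySem.Str.len x) (fun x => PySem.Str.lower x) false).head? =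
    List.foldl stepOpt none ms := by
  rw [show PySem.List.sorted2 ms (fun x => PySem.Str.len x) (fun x => PySem.Str.lower x) false =
      List.foldl (fun a x => PySem.List.insertBy ltLenLower x a) [] ms from rfl]
  exact head?_foldl_insertBy ltLenLower ms []

theorem bucket_eq (f : String → Bool) (cols : List String) :
    List.foldl stepOpt none (cols.filter f) = bucket f cols := by
  rw [List.foldl_filter]; rfl

theorem foldl_stepOpt_some (xs : List String) : ∀ m, List.foldl stepOpt (some m) xs ≠ none := by
  induction xs with
  | nil => intro m h; simp at h
  | cons x t ih =>
    intro m
    simp only [List.foldl_cons, stepOpt, stepBy]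
    split_ifs <;> exact ih _

theorem bucket_none_iff (f : String → Bool) (cols : List String) :
    bucket f cols = none ↔ cols.filter f = [] := by
  rw [← bucket_eq]
  cases h : cols.filter f with
  | nil => simp
  | cons m t =>
    simp only [List.foldl_cons]
    constructor
    · intro hc; exact absurd hc (foldl_stepOpt_some t m)
    · intro hc; simp at hc

theorem pop_head (s : List String) (hs : s ≠ []) :
    (match PySem.List.pop? s 0 with
      | some (v, _) => some v
      | none => (none : Option String)) = s.head? := by
  cases s with
  | nil => exact absurd rfl hs
  | cons m t => simp [PySem.List.pop?, PySem.List.pyIdx?]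

-- A's result in terms of the three unconditional buckets
theorem pickLoopA_char (cols : List String) (keys : List String) :
    pickLoopA cols keys =
      keys.foldr (fun key acc =>
        match bucket (fun c => PySem.Str.isIn key (PySem.Str.lower c)) cols with
        | some m => some m
        | none => acc) none := by
  induction keys with
  | nil => rfl
  | cons key rest ih =>
    show (if (cols.filter (fun c => PySem.Str.isIn key (PySem.Str.lower c))).isEmpty then
        pickLoopA cols rest
      else
        match PySem.List.pop? (PySem.List.sorted2 (cols.filter (fun c => PySem.Str.isIn key (PySem.Str.lower c)))
                (fun x => PySem.Str.len x) (fun x => PySem.Str.lower x) false) 0 with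
        | some (v, _) => some v
        | none => none) = _
    simp only [List.foldr_cons, ← ih]
    cases hcase : (cols.filter (fun c => PySem.Str.isIn key (PySem.Str.lower c))).isEmpty with
    | true =>
      rw [if_pos rfl, (bucket_none_iff _ _).mpr (List.isEmpty_iff.mp hcase)]
    | false =>
      have h' : cols.filter (fun c => PySem.Str.isIn key (PySem.Str.lower c)) ≠ [] := by
        intro hnil; rw [hnil] at hcase; simp at hcase
      have hsne : PySem.List.sorted2 (cols.filter (fun c => PySem.Str.isIn key (PySem.Str.lower c)))
          (fun x => PySem.Str.len x) (fun x => PySem.Str.lower x) false ≠ [] := by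
        intro hnil
        have hp := PySem.List.sorted2_perm (cols.filter (fun c => PySem.Str.isIn key (PySem.Str.lower c)))
          (fun x => PySem.Str.len x) (fun x => PySem.Str.lower x) false
        rw [hnil] at hp
        exact h' (List.Perm.nil_eq hp).symm
      rw [if_neg Bool.false_ne_true, pop_head _ hsne, head?_sorted2,
        bucket_eq]
      cases hbv : bucket (fun c => PySem.Str.isIn key (PySem.Str.lower c)) cols with
      | none => exact absurd ((bucket_none_iff _ _).mp hbv) h'
      | some m => rfl

theorem A_char (cols : List String) :
    pick_election_column cols =
      (match bucket fe cols with
      | some m => some m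
      | none =>
        match bucket fc cols with
        | some m => some m
        | none =>
          match bucket ft cols with
          | some m => some m
          | none => none) := by
  show pickLoopA cols ["election", "coverage", "tier"] = _
  rw [pickLoopA_char]
  rfl

-- the two spellings of a strict lexicographic step agree on a linear order
theorem int_lex (a b : Int) (q : Bool) :
    (decide (a < b) || (a == b && q)) = (decide (a < b) || (!decide (b < a) && q)) := by
  rcases lt_trichotomy a b with h | h | h
  · simp [h]
  · subst h; simp
  · simp [lt_asymm h, h, h.ne']

-- evaluating Python's tuple comparison on two composite keys
theorem keyLt_eval (p q : Int) (c m : String) :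
    pvKeyLt (p, PySem.Str.len c, PySem.Str.lower c) (q, PySem.Str.len m, PySem.Str.lower m) =
      (decide (p < q) || (p == q && ltLenLower c m)) := by
  simp only [pvKeyLt, ltLenLower, int_lex]

theorem Bstep_merge (c : String) (s0 s1 s2 : Option String) :
    Bstep (mergeB s0 s1 s2) c =
      mergeB (if fe c then stepOpt s0 c else s0)
             (if g1 c then stepOpt s1 c else s1)
             (if g2 c then stepOpt s2 c else s2) := by
  simp only [Bstep, pvPriority?, fe, fc, ft, g1, g2]
  rcases Bool.eq_false_or_eq_true (PySem.Str.isIn "election" (PySem.Str.lower c)) with he | he <;>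
    rcases Bool.eq_false_or_eq_true (PySem.Str.isIn "coverage" (PySem.Str.lower c)) with hc | hc <;>
      rcases Bool.eq_false_or_eq_true (PySem.Str.isIn "tier" (PySem.Str.lower c)) with ht | ht <;>
        cases s0 <;> cases s1 <;> cases s2 <;>
          · simp only [he, hc, ht, Bool.not_true, Bool.not_false, Bool.false_and, Bool.true_and,
              Bool.false_eq_true, if_false,
              mergeB, stepOpt, stepBy, bkey, keyLt_eval]
            try rfl
            try (split_ifs <;> simp_all)

theorem B_inv (cols : List String) : ∀ s0 s1 s2 : Option String,
    List.foldl Bstep (mergeB s0 s1 s2) cols =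
      mergeB (List.foldl (fun h c => if fe c then stepOpt h c else h) s0 cols)
             (List.foldl (fun h c => if g1 c then stepOpt h c else h) s1 cols)
             (List.foldl (fun h c => if g2 c then stepOpt h c else h) s2 cols) := by
  induction cols with
  | nil => intro s0 s1 s2; rfl
  | cons c t ih =>
    intro s0 s1 s2
    simp only [List.foldl_cons, Bstep_merge]
    exact ih _ _ _

theorem B_char (cols : List String) :
    pick_election_column_alt cols =
      (match mergeB (bucket fe cols) (bucket g1 cols) (bucket g2 cols) with
      | none => none
      | some b => some b.2) := by
  show (match List.foldl Bstep none cols with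
        | none => none
        | some b => some b.2) = _
  rw [show (none : Option ((Int × Int × String) × String)) = mergeB none none none from rfl,
    B_inv cols none none none]
  rfl

-- ===== VERDICT (by name: the statement is the Claim_ definition above) =====
theorem pick_election_column_spec : Claim_equal_pick_election_column := by
  intro cols _
  show pick_election_column cols = pick_election_column_alt cols
  rw [A_char, B_char]
  rcases hb0 : bucket fe cols with _ | m0
  · have h0 : ∀ c ∈ cols, fe c = false := by
      have := (bucket_none_iff fe cols).mp hb0
      intro c hcmem
      by_contra h
      have : c ∈ cols.filter fe := List.mem_filter.mpr ⟨hcmem, by simpa using h⟩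
      simp_all
    have hg1 : bucket g1 cols = bucket fc cols := by
      unfold bucket
      exact PySem.List.foldl_congr_mem cols _ _ none (by
        intro acc c hcmem
        simp [g1, h0 c hcmem])
    rcases hb1 : bucket fc cols with _ | m1
    · have h1 : ∀ c ∈ cols, fc c = false := by
        have := (bucket_none_iff fc cols).mp hb1
        intro c hcmem
        by_contra h
        have : c ∈ cols.filter fc := List.mem_filter.mpr ⟨hcmem, by simpa using h⟩
        simp_all
      have hg2 : bucket g2 cols = bucket ft cols := by
        unfold bucket
        exact PySem.List.foldl_congr_mem cols _ _ none (by
          intro acc c hcmem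
          simp [g2, h0 c hcmem, h1 c hcmem])
      rcases hb2 : bucket ft cols with _ | m2 <;>
        simp [mergeB, hg1, hg2, hb1, hb2]
    · simp [mergeB, hg1, hb1]
  · simp [mergeB]
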